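-- pv_equiv track=rewrite | github.com/linyao0409/leetcode_practice | algorithm/hw5.py | find_nearest_repeated_word
-- ===== SOURCE A (Python) =====
-- def find_nearest_repeated_word(s:list)->int:
--     near_dis = float("inf")
--     hashtable = {}
--     n = len(s)
--
--     for i in range(n):
--         if s[i] not in hashtable:
--             hashtable[s[i]] = i
--         else:
--             temp_dis = i - hashtable[s[i]]
--             hashtable[s[i]] = i
--             if temp_dis <= near_dis:
--                 near_dis = temp_dis
--     if type(near_dis) == int:
--         return near_dis
--     else:
--         return -1
-- ===== SOURCE B (Python) =====
-- def find_nearest_repeated_word(s: list) -> int: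
--     best = -1
--     for i in range(len(s)):
--         for j in range(i - 1, -1, -1):
--             if s[j] == s[i]:
--                 d = i - j
--                 if best < 0 or d < best:
--                     best = d
--                 break
--     return best
-- ===== Notes on version B (the rewrite author's own statement) =====
-- stated objective: alternative
-- what changed: Replaces A's single pass with a last-seen hash table by a dictionary-free nested scan: for each index, scan backwards for the nearest previous equal word and fold a running minimum initialised to -1 (no float('inf') sentinel, no type() test).
import Mathlib
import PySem

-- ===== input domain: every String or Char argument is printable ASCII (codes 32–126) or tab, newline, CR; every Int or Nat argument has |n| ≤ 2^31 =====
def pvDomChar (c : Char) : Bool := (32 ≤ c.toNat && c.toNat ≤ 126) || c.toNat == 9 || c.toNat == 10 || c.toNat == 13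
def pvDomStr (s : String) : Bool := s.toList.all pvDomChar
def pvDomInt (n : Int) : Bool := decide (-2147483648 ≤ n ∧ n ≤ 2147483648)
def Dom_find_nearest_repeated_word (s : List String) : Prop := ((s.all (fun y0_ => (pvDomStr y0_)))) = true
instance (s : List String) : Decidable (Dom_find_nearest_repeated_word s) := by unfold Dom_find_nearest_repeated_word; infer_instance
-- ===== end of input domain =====

-- B replaces A's one-pass last-seen hash table by a dictionary-free nested backward scan
-- with a running minimum initialised to -1 (alternative decomposition, not faster).

-- ===== PORT A =====
-- loop body of A's `for i in range(n)` loop; state = (near_dis as Option Int, hashtable).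
-- near_dis = none models float("inf"); `temp_dis <= inf` is always true.
-- s.getD i "" is s[i]: i ranges over range(len(s)), so always in bounds.
def pvStepA (s : List String) (st : Option Int × PySem.Dict String Int) (i : Nat) :
    Option Int × PySem.Dict String Int :=
  let w := s.getD i ""
  match PySem.Dict.get? st.2 w with
  | none => (st.1, st.2.insert w (i : Int))                 -- s[i] not in hashtable
  | some prev =>
      let temp : Int := (i : Int) - prev
      let h' := st.2.insert w (i : Int)
      match st.1 with
      | none => (some temp, h')                             -- temp_dis <= inf
      | some nd => if temp ≤ nd then (some temp, h') else (some nd, h')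

def find_nearest_repeated_word (s : List String) : Int :=
  let n := s.length
  let res := (List.range n).foldl (pvStepA s) (none, PySem.Dict.empty)
  match res.1 with
  | some d => d                                             -- type(near_dis) == int
  | none => -1

-- ===== PORT B =====
-- the inner `for j in range(i-1, -1, -1): ... break` loop: nearest previous index
-- of w strictly below the given bound, scanning downwards.
def pvScanBack (s : List String) (w : String) : Nat → Option Int
  | 0 => none
  | k + 1 => if s.getD k "" = w then some ((k : Nat) : Int) else pvScanBack s w k

def pvStepB (s : List String) (best : Int) (i : Nat) : Int :=
  match pvScanBack s (s.getD i "") i with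
  | none => best
  | some j =>
      let d := (i : Int) - j
      if best < 0 ∨ d < best then d else best

def find_nearest_repeated_word_alt (s : List String) : Int :=
  (List.range s.length).foldl (pvStepB s) (-1)

-- ===== PRECONDITION & SPEC =====
def Spec_find_nearest_repeated_word (s : List String) (out : Int) : Prop := out = find_nearest_repeated_word_alt s
instance (s : List String) (out : Int) : Decidable (Spec_find_nearest_repeated_word s out) := by unfold Spec_find_nearest_repeated_word; infer_instance

-- ===== CLAIM (what is proved, stated in full; the proofs are below) =====
def Claim_equal_find_nearest_repeated_word : Prop := ∀ (s : List String), Dom_find_nearest_repeated_word s → Spec_find_nearest_repeated_word s (find_nearest_repeated_word s)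

-- ===== LEMMAS AND PROOFS =====

-- relation between A's near_dis and B's running best
def pvRel (near : Option Int) (best : Int) : Prop :=
  (near = none ∧ best = -1) ∨ ∃ m, near = some m ∧ best = m ∧ 1 ≤ m

theorem pvScanBack_lt (s : List String) (w : String) (k : Nat) (j : Int)
    (h : pvScanBack s w k = some j) : 0 ≤ j ∧ j < (k : Int) := by
  induction k with
  | zero => simp [pvScanBack] at h
  | succ k ih =>
    unfold pvScanBack at h
    split at h
    · cases h; exact ⟨Int.natCast_nonneg k, by exact_mod_cast Nat.lt_succ_self k⟩
    · obtain ⟨h0, hlt⟩ := ih h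
      exact ⟨h0, lt_trans hlt (by exact_mod_cast Nat.lt_succ_self k)⟩

theorem pvMain (s : List String) (k : Nat) :
    (∀ w, ((List.range k).foldl (pvStepA s) (none, PySem.Dict.empty)).2.get? w
        = pvScanBack s w k) ∧
    pvRel ((List.range k).foldl (pvStepA s) (none, PySem.Dict.empty)).1
        ((List.range k).foldl (pvStepB s) (-1)) := by
  induction k with
  | zero => exact ⟨fun w => by simp [pvScanBack, PySem.Dict.get?_empty], Or.inl ⟨rfl, rfl⟩⟩
  | succ k ih =>
    obtain ⟨hdict, hrel⟩ := ih
    rw [List.range_succ, List.foldl_append, List.foldl_append]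
    simp only [List.foldl_cons, List.foldl_nil]
    set stA := (List.range k).foldl (pvStepA s) (none, PySem.Dict.empty) with hstA
    set bB := (List.range k).foldl (pvStepB s) (-1) with hbB
    have hdict' : ∀ (v : Int) (w' : String),
        ((stA.2.insert (s.getD k "") v).get? w'
          = if s.getD k "" = w' then some v else pvScanBack s w' k) := by
      intro v w'
      rw [PySem.Dict.get?_insert, hdict]
      by_cases h : s.getD k "" = w'
      · rw [if_pos h.symm, if_pos h]
      · rw [if_neg (fun hh => h hh.symm), if_neg h]
    have hd : ∀ w', ((stA.2.insert (s.getD k "") ((k : Nat) : Int)).get? w'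
        = pvScanBack s w' (k + 1)) := by
      intro w'
      rw [hdict']
      simp only [pvScanBack]
    simp only [pvStepA, pvStepB, hdict]
    cases hsb : pvScanBack s (s.getD k "") k with
    | none => exact ⟨hd, hrel⟩
    | some j =>
      obtain ⟨hj0, hjk⟩ := pvScanBack_lt s _ k j hsb
      have htemp : (1 : Int) ≤ (k : Int) - j := by omega
      rcases hrel with ⟨hn, hb⟩ | ⟨m, hn, hb, hm⟩
      · -- no repeat seen yet: A takes the inf branch, B's best is -1 < 0
        simp only [hn, hb]
        refine ⟨hd, ?_⟩
        rw [if_pos (Or.inl (by norm_num : (-1 : Int) < 0))]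
        exact Or.inr ⟨(k : Int) - j, rfl, rfl, htemp⟩
      · -- both hold the same minimum m ≥ 1
        simp only [hn, hb]
        constructor
        · intro w'
          split <;> exact hd w'
        · by_cases hle : (k : Int) - j ≤ m
          · rw [if_pos hle]
            by_cases hlt : (k : Int) - j < m
            · rw [if_pos (Or.inr hlt)]
              exact Or.inr ⟨(k : Int) - j, rfl, rfl, htemp⟩
            · have heq : (k : Int) - j = m := le_antisymm hle (not_lt.mp hlt)
              rw [if_neg (by omega)]
              exact Or.inr ⟨(k : Int) - j, rfl, heq.symm, htemp⟩
          · rw [if_neg hle]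
            rw [if_neg (by omega)]
            exact Or.inr ⟨m, rfl, rfl, hm⟩

-- ===== VERDICT (by name: the statement is the Claim_ definition above) =====
theorem find_nearest_repeated_word_spec : Claim_equal_find_nearest_repeated_word := by
  intro s _
  unfold Spec_find_nearest_repeated_word find_nearest_repeated_word find_nearest_repeated_word_alt
  obtain ⟨-, hrel⟩ := pvMain s s.length
  rcases hrel with ⟨hn, hb⟩ | ⟨m, hn, hb, -⟩ <;> simp [hn, hb]
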